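-- pv_equiv track=rewrite | github.com/ambicuity/New-Grad-Jobs | scripts/generate_companies.py | generate_workday_companies
-- ===== SOURCE A (Python) =====
-- def generate_workday_companies(count=1300, start_id=1):
--     """Generate Workday company entries"""
--     companies = []
--
--     industries = [
--         "Manufacturing", "Technology", "Healthcare", "Financial", "Retail",
--         "Energy", "Telecom", "Transportation", "Aerospace", "Defense",
--         "Pharmaceutical", "Consumer", "Industrial", "Professional", "Media"
--     ]
--
--     company_types = [
--         "Corporation", "Industries", "Group", "Systems", "Solutions",
--         "Services", "Technologies", "Enterprises", "Holdings", "Partners"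
--     ]
--
--     idx = start_id
--     for industry in industries:
--         for company_type in company_types:
--             for i in range(1, 10):
--                 if idx > count + start_id:
--                     break
--
--                 name = f"{industry} {company_type} {i}"
--                 slug = f"{industry.lower()}{company_type.lower()}{i}"
--                 wd_num = (idx % 10) + 1
--
--                 companies.append({
--                     "name": name,
--                     "workday_url": f"https://{slug}.wd{wd_num}.myworkdayjobs.com/{slug}"
--                 })
--                 idx += 1
--             if idx > count + start_id:
--                 break
--         if idx > count + start_id:
--             break
--
--     return companies[:count]
-- ===== SOURCE B (Python) =====
-- def generate_workday_companies(count=1300, start_id=1):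
--     """Generate Workday company entries"""
--     industries = [
--         "Manufacturing", "Technology", "Healthcare", "Financial", "Retail",
--         "Energy", "Telecom", "Transportation", "Aerospace", "Defense",
--         "Pharmaceutical", "Consumer", "Industrial", "Professional", "Media"
--     ]
--
--     company_types = [
--         "Corporation", "Industries", "Group", "Systems", "Solutions",
--         "Services", "Technologies", "Enterprises", "Holdings", "Partners"
--     ]
--
--     companies = []
--     for n in range(min(count, 1350)):
--         industry = industries[n // 90]
--         company_type = company_types[(n // 9) % 10]
--         i = (n % 9) + 1
--         idx = start_id + n
--         name = f"{industry} {company_type} {i}"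
--         slug = f"{industry.lower()}{company_type.lower()}{i}"
--         wd_num = (idx % 10) + 1
--         companies.append({
--             "name": name,
--             "workday_url": f"https://{slug}.wd{wd_num}.myworkdayjobs.com/{slug}"
--         })
--     return companies
-- ===== Notes on version B (the rewrite author's own statement) =====
-- stated objective: simpler
-- what changed: Replaces the three nested loops with idx-tracking and triple break logic plus a trailing trimming slice by a single loop over range(min(count,1350)) that recovers industry, company type and suffix from the flat index by div/mod arithmetic and returns the list directly.
import Mathlib
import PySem

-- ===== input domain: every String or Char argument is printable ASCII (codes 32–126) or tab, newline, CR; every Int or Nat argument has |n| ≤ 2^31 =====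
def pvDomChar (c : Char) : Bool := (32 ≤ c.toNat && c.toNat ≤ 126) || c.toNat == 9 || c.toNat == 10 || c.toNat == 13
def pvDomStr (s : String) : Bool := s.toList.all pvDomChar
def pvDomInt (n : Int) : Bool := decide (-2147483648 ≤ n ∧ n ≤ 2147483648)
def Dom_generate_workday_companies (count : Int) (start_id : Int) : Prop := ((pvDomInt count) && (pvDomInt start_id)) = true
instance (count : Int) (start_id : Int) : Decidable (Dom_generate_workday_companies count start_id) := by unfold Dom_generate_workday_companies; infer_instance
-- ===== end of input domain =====

-- B replaces A's three nested loops + idx/break logic + trailing slice by one loop over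
-- range(min(count,1350)) with div/mod index arithmetic (objective: simpler).

-- ===== PORT A =====
def pvIndustries : List String :=
  ["Manufacturing", "Technology", "Healthcare", "Financial", "Retail",
   "Energy", "Telecom", "Transportation", "Aerospace", "Defense",
   "Pharmaceutical", "Consumer", "Industrial", "Professional", "Media"]

def pvCompanyTypes : List String :=
  ["Corporation", "Industries", "Group", "Systems", "Solutions",
   "Services", "Technologies", "Enterprises", "Holdings", "Partners"]

-- the dict literal A appends (name / workday_url construction, shared shape)
def pvItem (industry company_type : String) (i idx : Int) : List (String × String) :=
  let name := industry ++ " " ++ company_type ++ " " ++ PySem.Int.toStr i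
  let slug := PySem.Str.lower industry ++ PySem.Str.lower company_type ++ PySem.Int.toStr i
  let wd_num := PySem.Int.mod idx 10 + 1
  [("name", name),
   ("workday_url", "https://" ++ slug ++ ".wd" ++ PySem.Int.toStr wd_num ++ ".myworkdayjobs.com/" ++ slug)]

-- innermost 'for i in range(1, 10)' with its 'break'
def pvInnerA (t : Int) (industry company_type : String) :
    List Int → Int → List (List (String × String)) → Int × List (List (String × String))
  | [], idx, companies => (idx, companies)
  | i :: rest, idx, companies =>
    if idx > t then (idx, companies)
    else pvInnerA t industry company_type rest (idx + 1) (companies ++ [pvItem industry company_type i idx])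

-- middle 'for company_type in company_types' with its 'break'
def pvMidA (t : Int) (industry : String) :
    List String → Int → List (List (String × String)) → Int × List (List (String × String))
  | [], idx, companies => (idx, companies)
  | company_type :: rest, idx, companies =>
    let r := pvInnerA t industry company_type (PySem.List.pyRange 1 10 1) idx companies
    if r.1 > t then r else pvMidA t industry rest r.1 r.2

-- outer 'for industry in industries' with its 'break'
def pvOuterA (t : Int) :
    List String → Int → List (List (String × String)) → Int × List (List (String × String))
  | [], idx, companies => (idx, companies)
  | industry :: rest, idx, companies =>
    let r := pvMidA t industry pvCompanyTypes idx companies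
    if r.1 > t then r else pvOuterA t rest r.1 r.2

def generate_workday_companies (count : Int) (start_id : Int) : List (List (String × String)) :=
  let r := pvOuterA (count + start_id) pvIndustries start_id []
  PySem.List.slice r.2 none (some count)   -- companies[:count]

-- ===== PORT B =====
def generate_workday_companies_alt (count : Int) (start_id : Int) : List (List (String × String)) :=
  (PySem.List.pyRange 0 (min count 1350) 1).foldl (fun companies n =>
    -- both list indices are provably in range for 0 ≤ n < 1350; Python never raises here
    let industry := (PySem.List.pyGet? pvIndustries (PySem.Int.floordiv n 90)).getD ""
    let company_type := (PySem.List.pyGet? pvCompanyTypes (PySem.Int.mod (PySem.Int.floordiv n 9) 10)).getD ""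
    let i := PySem.Int.mod n 9 + 1
    let idx := start_id + n
    let name := industry ++ " " ++ company_type ++ " " ++ PySem.Int.toStr i
    let slug := PySem.Str.lower industry ++ PySem.Str.lower company_type ++ PySem.Int.toStr i
    let wd_num := PySem.Int.mod idx 10 + 1
    companies ++ [[("name", name),
      ("workday_url", "https://" ++ slug ++ ".wd" ++ PySem.Int.toStr wd_num ++ ".myworkdayjobs.com/" ++ slug)]]) []

-- ===== PRECONDITION & SPEC =====
def Spec_generate_workday_companies (count : Int) (start_id : Int) (out : List (List (String × String))) : Prop := out = generate_workday_companies_alt count start_id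
instance (count : Int) (start_id : Int) (out : List (List (String × String))) : Decidable (Spec_generate_workday_companies count start_id out) := by unfold Spec_generate_workday_companies; infer_instance

-- ===== CLAIM (what is proved, stated in full; the proofs are below) =====
def Claim_equal_generate_workday_companies : Prop := ∀ (count : Int) (start_id : Int), Dom_generate_workday_companies count start_id → Spec_generate_workday_companies count start_id (generate_workday_companies count start_id)

-- ===== LEMMAS AND PROOFS =====

-- the (industry, company_type, i) triple B reads off from the flat index n
def pvGTriple (n : Int) : String × String × Int :=
  ((PySem.List.pyGet? pvIndustries (PySem.Int.floordiv n 90)).getD "",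
   (PySem.List.pyGet? pvCompanyTypes (PySem.Int.mod (PySem.Int.floordiv n 9) 10)).getD "",
   PySem.Int.mod n 9 + 1)

def pvItemT (tr : String × String × Int) (idx : Int) : List (String × String) :=
  pvItem tr.1 tr.2.1 tr.2.2 idx

-- flat version of A's nested loops: one pass over the triple sequence
def pvFlatA (t : Int) : List (String × String × Int) → Int → List (List (String × String)) → Int × List (List (String × String))
  | [], idx, acc => (idx, acc)
  | tr :: rest, idx, acc =>
    if idx > t then (idx, acc)
    else pvFlatA t rest (idx + 1) (acc ++ [pvItemT tr idx])

def pvTriples : List (String × String × Int) :=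
  pvIndustries.flatMap fun ind => pvCompanyTypes.flatMap fun ct =>
    (PySem.List.pyRange 1 10 1).map fun i => (ind, ct, i)

def pvBuild : List (String × String × Int) → Int → List (List (String × String))
  | [], _ => []
  | tr :: rest, idx => pvItemT tr idx :: pvBuild rest (idx + 1)

lemma pvFlat_stop (t : Int) (l : List (String × String × Int)) (idx : Int) (acc : List (List (String × String))) (h : idx > t) :
    pvFlatA t l idx acc = (idx, acc) := by
  cases l <;> simp [pvFlatA, h]

lemma pvInner_eq_flat (t : Int) (ind ct : String) (is : List Int) (idx : Int) (acc : List (List (String × String))) :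
    pvInnerA t ind ct is idx acc = pvFlatA t (is.map fun i => (ind, ct, i)) idx acc := by
  induction is generalizing idx acc with
  | nil => simp [pvInnerA, pvFlatA]
  | cons i rest ih => simp [pvInnerA, pvFlatA, pvItemT, pvItem, ih]

lemma pvFlat_append (t : Int) (l1 l2 : List (String × String × Int)) (idx : Int) (acc : List (List (String × String))) :
    pvFlatA t (l1 ++ l2) idx acc = pvFlatA t l2 (pvFlatA t l1 idx acc).1 (pvFlatA t l1 idx acc).2 := by
  induction l1 generalizing idx acc with
  | nil => simp [pvFlatA]
  | cons tr rest ih =>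
    by_cases h : idx > t
    · simp [pvFlatA, h, pvFlat_stop t l2 idx acc h]
    · simp [pvFlatA, h, ih]

lemma pvMid_eq_flat (t : Int) (ind : String) (cts : List String) (idx : Int) (acc : List (List (String × String))) :
    pvMidA t ind cts idx acc =
      pvFlatA t (cts.flatMap fun ct => (PySem.List.pyRange 1 10 1).map fun i => (ind, ct, i)) idx acc := by
  induction cts generalizing idx acc with
  | nil => simp [pvMidA, pvFlatA]
  | cons ct rest ih =>
    rw [List.flatMap_cons, pvFlat_append]
    simp only [pvMidA, pvInner_eq_flat]
    set r := pvFlatA t ((PySem.List.pyRange 1 10 1).map fun i => (ind, ct, i)) idx acc with hr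
    by_cases h : r.1 > t
    · simp [h, pvFlat_stop t _ r.1 r.2 h]
    · simp [h, ih]

lemma pvOuter_eq_flat (t : Int) (inds : List String) (idx : Int) (acc : List (List (String × String))) :
    pvOuterA t inds idx acc =
      pvFlatA t (inds.flatMap fun ind => pvCompanyTypes.flatMap fun ct => (PySem.List.pyRange 1 10 1).map fun i => (ind, ct, i)) idx acc := by
  induction inds generalizing idx acc with
  | nil => simp [pvOuterA, pvFlatA]
  | cons ind rest ih =>
    rw [List.flatMap_cons, pvFlat_append]
    simp only [pvOuterA, pvMid_eq_flat]
    set r := pvFlatA t (pvCompanyTypes.flatMap fun ct => (PySem.List.pyRange 1 10 1).map fun i => (ind, ct, i)) idx acc with hr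
    by_cases h : r.1 > t
    · simp [h, pvFlat_stop t _ r.1 r.2 h]
    · simp [h, ih]

lemma pvFlat_spec (t : Int) (ts : List (String × String × Int)) (idx : Int) (acc : List (List (String × String))) :
    pvFlatA t ts idx acc =
      (idx + ↑(min ts.length (t + 1 - idx).toNat), acc ++ pvBuild (ts.take (t + 1 - idx).toNat) idx) := by
  induction ts generalizing idx acc with
  | nil => simp [pvFlatA, pvBuild]
  | cons tr rest ih =>
    by_cases h : idx > t
    · have h0 : (t + 1 - idx).toNat = 0 := by omega
      simp [pvFlatA, h, h0, pvBuild]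
    · have hk : (t + 1 - idx).toNat = (t + 1 - (idx + 1)).toNat + 1 := by omega
      rw [pvFlatA, if_neg h, ih, hk]
      simp only [List.take_succ_cons, pvBuild, List.length_cons, Nat.succ_min_succ, Prod.mk.injEq]
      constructor
      · push_cast; ring_nf
      · simp

lemma pvBuild_take (ts : List (String × String × Int)) (m : Nat) (idx : Int) :
    pvBuild (ts.take m) idx = (pvBuild ts idx).take m := by
  induction ts generalizing m idx with
  | nil => simp [pvBuild]
  | cons tr rest ih =>
    cases m with
    | zero => simp [pvBuild]
    | succ m' => simp [pvBuild, ih]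

lemma pvBuild_getElem? (ts : List (String × String × Int)) (idx : Int) (n : Nat) :
    (pvBuild ts idx)[n]? = ts[n]?.map fun tr => pvItemT tr (idx + ↑n) := by
  induction ts generalizing idx n with
  | nil => simp [pvBuild]
  | cons tr rest ih =>
    cases n with
    | zero => simp [pvBuild]
    | succ n' =>
      simp only [pvBuild, List.getElem?_cons_succ, ih]
      congr 2
      push_cast; ring_nf

set_option maxRecDepth 40000 in
lemma pvTriples_eq : pvTriples = (List.range 1350).map fun (n : Nat) => pvGTriple (Int.ofNat n) := by decide

lemma pvBuild_length (ts : List (String × String × Int)) (idx : Int) : (pvBuild ts idx).length = ts.length := by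
  induction ts generalizing idx with
  | nil => rfl
  | cons tr rest ih => simp [pvBuild, ih]

theorem pv_main (count start_id : Int) :
    generate_workday_companies count start_id = generate_workday_companies_alt count start_id := by
  -- B as a map over List.range
  have hB : generate_workday_companies_alt count start_id =
      (List.range (min count 1350 - 0).toNat).map fun (k : Nat) => pvItemT (pvGTriple (Int.ofNat k)) (start_id + Int.ofNat k) := by
    rw [generate_workday_companies_alt, PySem.List.pyRange_one,
        PySem.List.foldl_append_singleton_eq_map, List.map_map]
    simp only [Function.comp_def, zero_add, List.nil_append]
    rfl
  by_cases hc : count < 0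
  -- count < 0: A appends nothing (idx > t at once) and slices []; B's range is empty
  · have ht : start_id > count + start_id := by omega
    have hA : pvOuterA (count + start_id) pvIndustries start_id [] = (start_id, []) := by
      rw [pvOuter_eq_flat, pvFlat_stop _ _ _ _ ht]
    have hm : (min count 1350 - 0).toNat = 0 := by omega
    rw [generate_workday_companies, hB, hm]
    simp [hA, PySem.List.slice]
  -- 0 ≤ count: A = take count of the full build; B = map over range (min count 1350)
  · rw [Int.not_lt] at hc
    have hA : generate_workday_companies count start_id =
        ((pvBuild pvTriples start_id).take (count + 1).toNat).take count.toNat := by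
      rw [generate_workday_companies]
      rw [pvOuter_eq_flat, pvFlat_spec]
      have ht : (count + start_id + 1 - start_id).toNat = (count + 1).toNat := by omega
      rw [ht]
      simp only [List.nil_append]
      rw [PySem.List.slice_to _ hc, pvBuild_take]
      rfl
    rw [hA, hB, List.take_take]
    have hmin : min count.toNat (count + 1).toNat = count.toNat := by omega
    rw [hmin]
    apply List.ext_getElem?
    intro n
    have hlen : (pvBuild pvTriples start_id).length = 1350 := by
      rw [pvBuild_length, pvTriples_eq]; simp only [List.length_map, List.length_range]
    by_cases hn : n < (min count 1350 - 0).toNat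
    · have hn1 : n < 1350 := by omega
      have hnc : n < count.toNat := by omega
      rw [List.getElem?_take_of_lt hnc, pvBuild_getElem?, pvTriples_eq]
      simp only [List.getElem?_map]
      rw [List.getElem?_range hn1, List.getElem?_range hn]
      simp only [Option.map_some]
      rfl
    · have h1 : ((pvBuild pvTriples start_id).take count.toNat)[n]? = none := by
        rw [List.getElem?_eq_none_iff]
        simp only [List.length_take, hlen]
        omega
      rw [h1]
      rw [Eq.comm, List.getElem?_eq_none_iff]
      simp only [List.length_map, List.length_range]
      omega

-- ===== VERDICT (by name: the statement is the Claim_ definition above) =====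
theorem generate_workday_companies_spec : Claim_equal_generate_workday_companies := by
  intro count start_id _
  unfold Spec_generate_workday_companies
  exact pv_main count start_id
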